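-- pv_equiv track=rewrite | github.com/Zennoon/codewars | pop_same_adj.py | pop_blocks
-- ===== SOURCE A (Python) =====
-- def pop_blocks(lst):
--     lst.append(None)
--     i = 0
--     while(lst[i] != None):
--         if (lst[i] == lst[i + 1]):
--             j = i + 1
--             while (lst[j] != None):
--                 if (lst[i] != lst[j]):
--                     break
--                 lst.pop(j)
--             lst.pop(i)
--             if (i != 0):
--                 i -= 2
--             else:
--                 i -= 1
--         i += 1
--     lst.pop(i)
--     return (lst)
-- ===== SOURCE B (Python) =====
-- def pop_blocks(lst):
--     # Single-pass stack of [value, count]; note: unlike A, this does not mutate lst.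
--     stack = []
--     for x in lst:
--         if stack and stack[-1][0] == x:
--             stack[-1][1] += 1
--         else:
--             if stack and stack[-1][1] >= 2:
--                 stack.pop()
--             if stack and stack[-1][0] == x:
--                 stack[-1][1] += 1
--             else:
--                 stack.append([x, 1])
--     if stack and stack[-1][1] >= 2:
--         stack.pop()
--     return [v for v, c in stack]
-- ===== Notes on version B (the rewrite author's own statement) =====
-- stated objective: alternative
-- what changed: Replaced A's index-walking scan with backtracking and repeated in-place list.pop calls by a single left-to-right pass over a stack of (value,count) pairs that removes count>=2 groups and merges neighbours; B also leaves the input list unmutated.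
import Mathlib
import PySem

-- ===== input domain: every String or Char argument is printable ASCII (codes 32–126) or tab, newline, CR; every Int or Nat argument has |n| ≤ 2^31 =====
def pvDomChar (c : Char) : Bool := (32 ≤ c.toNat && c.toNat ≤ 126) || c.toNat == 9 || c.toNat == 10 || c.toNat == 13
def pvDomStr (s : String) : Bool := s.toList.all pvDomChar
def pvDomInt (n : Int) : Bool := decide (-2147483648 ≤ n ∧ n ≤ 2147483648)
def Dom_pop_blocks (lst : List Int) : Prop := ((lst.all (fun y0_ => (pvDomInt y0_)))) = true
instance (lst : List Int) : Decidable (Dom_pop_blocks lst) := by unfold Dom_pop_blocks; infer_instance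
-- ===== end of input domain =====

-- B replaces A's quadratic rescan-and-pop loop by a one-pass (value,count) stack.
-- Return-value equivalence only: Python A mutates lst in place (appends/pops); B does not.

-- ===== PORT A =====
-- A's inner while loop (j = i+1; pop lst[j] while lst[j] == lst[i]) as its own recursion:
def dropEq (v : Int) (l : List Int) : List Int :=
  match l with
  | [] => []
  | x :: rest => if x = v then dropEq v rest else x :: rest

theorem dropEq_len_le (v : Int) (l : List Int) : (dropEq v l).length ≤ l.length := by
  induction l with
  | nil => simp [dropEq]
  | cons x rest ih =>
    simp only [dropEq]
    split
    · exact Nat.le_trans ih (Nat.le_succ _)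
    · simp

-- A's outer while loop over (lst, i), written as the zipper (pre = reversed lst[0:i],
-- suf = lst[i:]); the None sentinel is the end of suf.  The branches are A's, in order:
--  * suf = [] resp. lst[i+1] == None: the loop ends (after one last i += 1), pop the
--    sentinel, return the list;
--  * lst[i] == lst[i+1]: the inner loop pops the run after i, then pop(i), then
--    i -= 2 (or i -= 1 when i == 0) and i += 1 — i.e. one prefix element moves back to suf;
--  * otherwise: i += 1.
def aloop (pre : List Int) (suf : List Int) : List Int :=
  match pre, suf with
  | pre, [] => pre.reverse
  | pre, [x] => (x :: pre).reverse
  | pre, x :: y :: rest =>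
    if _h : x = y then
      match pre with
      | p :: pre' => aloop pre' (p :: dropEq x (y :: rest))
      | [] => aloop [] (dropEq x (y :: rest))
    else
      aloop (x :: pre) (y :: rest)
termination_by pre.length + 2 * suf.length
decreasing_by
  · have h1 : (dropEq x (y :: rest)).length ≤ rest.length := by
      simpa [dropEq, _h] using dropEq_len_le x rest
    simp; omega
  · have h1 : (dropEq x (y :: rest)).length ≤ rest.length := by
      simpa [dropEq, _h] using dropEq_len_le x rest
    simp; omega
  · simp; omega

def pop_blocks (lst : List Int) : List Int := aloop [] lst

-- ===== PORT B =====
-- one step of B's loop body: merge into the top, else pop a count≥2 group and merge/push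
def bstep (stack : List (Int × Int)) (x : Int) : List (Int × Int) :=
  match stack with
  | [] => [(x, 1)]
  | (v, c) :: rest =>
    if v = x then (v, c + 1) :: rest
    else if 2 ≤ c then
      match rest with
      | [] => [(x, 1)]
      | (v2, c2) :: rest2 => if v2 = x then (v2, c2 + 1) :: rest2 else (x, 1) :: rest
    else (x, 1) :: (v, c) :: rest

-- final `if stack and stack[-1][1] >= 2: stack.pop()`
def bfinal (stack : List (Int × Int)) : List (Int × Int) :=
  match stack with
  | (v, c) :: rest => if 2 ≤ c then rest else (v, c) :: rest
  | [] => []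

def pop_blocks_alt (lst : List Int) : List Int :=
  ((bfinal (lst.foldl bstep [])).map Prod.fst).reverse

-- ===== PRECONDITION & SPEC =====
def Spec_pop_blocks (lst : List Int) (out : List Int) : Prop := out = pop_blocks_alt lst
instance (lst : List Int) (out : List Int) : Decidable (Spec_pop_blocks lst out) := by unfold Spec_pop_blocks; infer_instance

-- ===== CLAIM (what is proved, stated in full; the proofs are below) =====
def Claim_equal_pop_blocks : Prop := ∀ (lst : List Int), Dom_pop_blocks lst → Spec_pop_blocks lst (pop_blocks lst)

-- ===== LEMMAS AND PROOFS =====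

-- B's run continued from a mid-state
def brun (st : List (Int × Int)) (suf : List Int) : List Int :=
  ((bfinal (suf.foldl bstep st)).map Prod.fst).reverse

-- a stack of count-1 entries
def stack1 (pre : List Int) : List (Int × Int) := pre.map (fun v => (v, 1))

theorem stack1_cons (p : Int) (l : List Int) : stack1 (p :: l) = (p, 1) :: stack1 l := rfl

theorem stack1_fst (pre : List Int) : (stack1 pre).map Prod.fst = pre := by
  induction pre with
  | nil => rfl
  | cons p pre ih => simp [stack1] at ih ⊢; exact ih

theorem brun_cons (st : List (Int × Int)) (x : Int) (suf : List Int) :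
    brun st (x :: suf) = brun (bstep st x) suf := rfl

-- consuming m copies of v with (v,c) on top just bumps the count
theorem brun_replicate (m : ℕ) (v : Int) (c : ℕ) (st : List (Int × Int)) (suf : List Int) :
    brun ((v, (c : Int)) :: st) (List.replicate m v ++ suf)
      = brun ((v, ((c + m : ℕ) : Int)) :: st) suf := by
  induction m generalizing c with
  | zero => simp
  | succ k ih =>
    have h1 : brun ((v, (c : Int)) :: st) (v :: (List.replicate k v ++ suf))
        = brun ((v, ((c + 1 : ℕ) : Int)) :: st) (List.replicate k v ++ suf) := by
      rw [brun_cons]; simp [bstep]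
    have h2 := ih (c + 1)
    have hck : c + 1 + k = c + (k + 1) := by omega
    rw [List.replicate_succ, List.cons_append, h1, h2, hck]

-- decompose any list into its leading run of v
theorem run_decomp (v : Int) (l : List Int) :
    ∃ m S2, l = List.replicate m v ++ S2 ∧ (S2 = [] ∨ ∃ z S2', S2 = z :: S2' ∧ z ≠ v) := by
  induction l with
  | nil => exact ⟨0, [], by simp, Or.inl rfl⟩
  | cons x rest ih =>
    by_cases hx : x = v
    · obtain ⟨m, S2, hdec, hS2⟩ := ih
      exact ⟨m + 1, S2, by simp [List.replicate_succ, hdec, hx], hS2⟩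
    · exact ⟨0, x :: rest, by simp, Or.inr ⟨x, rest, rfl, hx⟩⟩

theorem dropEq_replicate (v : Int) (m : ℕ) (S2 : List Int)
    (h : S2 = [] ∨ ∃ z S2', S2 = z :: S2' ∧ z ≠ v) :
    dropEq v (List.replicate m v ++ S2) = S2 := by
  induction m with
  | zero =>
    rcases h with h | ⟨z, S2', rfl, hz⟩
    · simp [h, dropEq]
    · simp [dropEq, hz]
  | succ k ih => simpa [List.replicate_succ, dropEq] using ih

theorem aloop_step (pre : List Int) (x y : Int) (rest : List Int) (h : x ≠ y) :
    aloop pre (x :: y :: rest) = aloop (x :: pre) (y :: rest) := by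
  rw [aloop.eq_def]; simp [h]

-- the scanned prefix never contains an adjacent equal pair
def adjD : List Int → Prop
  | a :: b :: l => a ≠ b ∧ adjD (b :: l)
  | _ => True

-- THE MAIN INVARIANT.  A-state (pre, v^c ++ S), where the scanned prefix v :: pre is
-- adjacent-distinct, corresponds to B-state (stack = (v,c) on top of count-1 pre, input S).
theorem main_inv (n : ℕ) (pre : List Int) (v : Int) (c : ℕ) (S : List Int)
    (hc : 1 ≤ c)
    (hn : pre.length + 2 * (c + S.length) ≤ n)
    (hch : adjD (v :: pre)) :
    aloop pre (v :: (List.replicate (c - 1) v ++ S)) = brun ((v, (c : Int)) :: stack1 pre) S := by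
  induction n generalizing pre v c S with
  | zero => omega
  | succ n ih =>
    obtain ⟨m, S2, rfl, hS2⟩ := run_decomp v S
    by_cases hrun : 2 ≤ c + m
    · -- the front run of A's suffix has total length c + m ≥ 2: A removes it wholesale
      have hR : c - 1 + m = (c + m - 1 - 1) + 1 := by omega
      have hsuf : List.replicate (c - 1) v ++ (List.replicate m v ++ S2)
          = v :: (List.replicate (c + m - 1 - 1) v ++ S2) := by
        rw [← List.append_assoc, ← List.replicate_add, hR, List.replicate_succ]; simp
      have hdrop : dropEq v (v :: (List.replicate (c + m - 1 - 1) v ++ S2)) = S2 := by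
        have : v :: (List.replicate (c + m - 1 - 1) v ++ S2)
            = List.replicate (c + m - 1) v ++ S2 := by
          have : c + m - 1 = (c + m - 1 - 1) + 1 := by omega
          rw [this, List.replicate_succ]; simp
        rw [this]; exact dropEq_replicate v _ S2 hS2
      have hB : brun ((v, (c : Int)) :: stack1 pre) (List.replicate m v ++ S2)
          = brun ((v, ((c + m : ℕ) : Int)) :: stack1 pre) S2 := brun_replicate m v c _ S2
      have h2c : (2:Int) ≤ (c:Int) + (m:Int) := by omega
      rw [hsuf, hB]
      cases pre with
      | nil =>
        rw [aloop]
        simp only [↓reduceDIte, hdrop]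
        rcases hS2 with rfl | ⟨z, S2', rfl, hz⟩
        · -- end of input: B pops the count≥2 top; A's list is the empty prefix
          simp [aloop, brun, bfinal, stack1, h2c]
        · -- next element z ≠ v: B pops the group and pushes z
          have hb : bstep ((v, ((c + m : ℕ) : Int)) :: stack1 []) z = [(z, 1)] := by
            simp [bstep, stack1, (Ne.symm hz), h2c]
          rw [brun_cons, hb]
          have := ih [] z 1 S2' (by omega) (by simp at hn ⊢; omega) trivial
          simpa [stack1] using this
      | cons p pre' =>
        rw [aloop]
        simp only [↓reduceDIte, hdrop]
        have hvp : v ≠ p := hch.1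
        have hchp : adjD (p :: pre') := hch.2
        rcases hS2 with rfl | ⟨z, S2', rfl, hz⟩
        · -- end of input: B pops the count≥2 top leaving the count-1 prefix
          simp [aloop, brun, bfinal, stack1_cons, stack1_fst, h2c]
        · rw [brun_cons]
          by_cases hpz : p = z
          · -- B pops the group and merges z into the uncovered (p,1)
            rcases hpz.symm with rfl
            have hb : bstep ((v, ((c + m : ℕ) : Int)) :: stack1 (z :: pre')) z
                = (z, 2) :: stack1 pre' := by
              simp [bstep, stack1, hvp, h2c]
            rw [hb]
            have := ih pre' z 2 S2' (by omega) (by simp at hn ⊢; omega) hchp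
            simpa using this
          · -- B pops the group and pushes z on top of (p,1)
            have hb : bstep ((v, ((c + m : ℕ) : Int)) :: stack1 (p :: pre')) z
                = (z, 1) :: stack1 (p :: pre') := by
              simp [bstep, (Ne.symm hz), stack1, hpz, h2c]
            rw [hb]
            have h1 := ih pre' p 1 (z :: S2') (by omega) (by simp at hn ⊢; omega) hchp
            have h2 : brun ((p, (1:ℕ)) :: stack1 pre') (z :: S2')
                = brun ((z, (1:ℕ)) :: stack1 (p :: pre')) S2' := by
              rw [brun_cons]
              simp [bstep, hpz, stack1]
            simp only [List.replicate, List.nil_append] at h1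
            simpa using h1.trans h2
    · -- c = 1 and no further v: A just steps over v
      have hc1 : c = 1 := by omega
      have hm0 : m = 0 := by omega
      subst hc1; subst hm0
      simp only [List.replicate, List.nil_append]
      rcases hS2 with rfl | ⟨z, S2', rfl, hz⟩
      · -- end of input, count-1 top is kept
        simp [aloop, brun, bfinal, stack1_fst]
      · -- z ≠ v is pushed
        have hvz : v ≠ z := Ne.symm hz
        rw [aloop_step pre v z S2' hvz]
        have h1 := ih (v :: pre) z 1 S2' (by omega) (by simp at hn ⊢; omega) ⟨hz, hch⟩
        have h2 : brun ((v, ((1:ℕ):Int)) :: stack1 pre) (z :: S2')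
            = brun ((z, ((1:ℕ):Int)) :: stack1 (v :: pre)) S2' := by
          rw [brun_cons]; simp [bstep, hvz, stack1]
        simp only [List.replicate, List.nil_append] at h1
        rw [h2]; exact h1

-- ===== VERDICT (by name: the statement is the Claim_ definition above) =====
theorem pop_blocks_spec : Claim_equal_pop_blocks := by
  intro lst _
  unfold Spec_pop_blocks pop_blocks pop_blocks_alt
  cases lst with
  | nil => simp [aloop, bfinal]
  | cons x rest =>
    have := main_inv (0 + 2 * (1 + rest.length)) [] x 1 rest (by omega) (by simp) trivial
    simp only [List.replicate, List.nil_append, stack1, List.map_nil] at this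
    rw [this]
    rfl
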